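-- pv_equiv track=rewrite | github.com/gino2010/pythontech | toilet/toilet.py | policy_all
-- ===== SOURCE A (Python) =====
-- def policy_all(init, person, final):
--     count = 0
--     for item in person:
--         count += init ^ item
--         if final is None:
--             init = item
--         else:
--             count += item ^ final
--     return count
-- ===== SOURCE B (Python) =====
-- def _chain(seq, lo, hi):
--     # sum of seq[i] ^ seq[i+1] for lo <= i < hi, by binary splitting
--     if hi - lo <= 0:
--         return 0
--     if hi - lo == 1:
--         return seq[lo] ^ seq[lo + 1]
--     mid = (lo + hi) // 2
--     return _chain(seq, lo, mid) + _chain(seq, mid, hi)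
--
--
-- def _pair(items, lo, hi, init, final):
--     # sum of (init ^ items[i]) + (items[i] ^ final) for lo <= i < hi, by binary splitting
--     if hi - lo <= 0:
--         return 0
--     if hi - lo == 1:
--         x = items[lo]
--         return (init ^ x) + (x ^ final)
--     mid = (lo + hi) // 2
--     return _pair(items, lo, mid, init, final) + _pair(items, mid, hi, init, final)
--
--
-- def policy_all(init, person, final):
--     items = list(person)
--     if final is None:
--         return _chain([init] + items, 0, len(items))
--     return _pair(items, 0, len(items), init, final)
-- ===== Notes on version B (the rewrite author's own statement) =====
-- stated objective: alternative
-- what changed: Replaces the single accumulator loop with a branch-hoisted divide-and-conquer: each mode is a binary-splitting segment sum over index ranges (chained pairwise XOR over [init]+items when final is None, per-element (init^x)+(x^final) otherwise), with O(log n) recursion depth and no mutated loop state.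
import Mathlib
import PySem

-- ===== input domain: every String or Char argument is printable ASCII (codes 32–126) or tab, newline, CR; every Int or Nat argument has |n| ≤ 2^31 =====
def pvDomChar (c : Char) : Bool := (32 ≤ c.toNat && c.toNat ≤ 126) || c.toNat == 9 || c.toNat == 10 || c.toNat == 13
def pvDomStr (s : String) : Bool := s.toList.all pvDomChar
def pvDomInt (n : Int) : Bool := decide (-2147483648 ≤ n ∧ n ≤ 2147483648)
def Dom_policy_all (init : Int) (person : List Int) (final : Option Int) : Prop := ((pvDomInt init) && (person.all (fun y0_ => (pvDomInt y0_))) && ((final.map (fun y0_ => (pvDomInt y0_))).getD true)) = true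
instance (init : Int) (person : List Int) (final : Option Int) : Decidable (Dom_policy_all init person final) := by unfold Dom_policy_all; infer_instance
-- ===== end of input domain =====

-- B replaces A's accumulator loop with a branch-hoisted divide-and-conquer segment sum
-- over index ranges (alternative decomposition, same O(n) cost).


-- ===== PORT A =====
def policy_all (init : Int) (person : List Int) (final : Option Int) : Int :=
  (person.foldl (fun (s : Int × Int) item =>
      let count := s.1 + PySem.Int.bxor s.2 item
      match final with
      | none => (count, item)
      | some f => (count + PySem.Int.bxor item f, s.2)) (0, init)).1

-- ===== PORT B =====
-- sum of seq[i] ^ seq[i+1] for lo <= i < hi, by binary splitting (indices always in range)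
def pvChainDC (seq : List Int) (lo hi : Nat) : Int :=
  if hi ≤ lo then 0
  else if hi - lo = 1 then PySem.Int.bxor (seq.getD lo 0) (seq.getD (lo + 1) 0)
  else pvChainDC seq lo ((lo + hi) / 2) + pvChainDC seq ((lo + hi) / 2) hi
termination_by hi - lo
decreasing_by all_goals omega

-- sum of (init ^ items[i]) + (items[i] ^ final) for lo <= i < hi, by binary splitting
def pvPairDC (items : List Int) (lo hi : Nat) (init final : Int) : Int :=
  if hi ≤ lo then 0
  else if hi - lo = 1 then
    let x := items.getD lo 0
    PySem.Int.bxor init x + PySem.Int.bxor x final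
  else pvPairDC items lo ((lo + hi) / 2) init final + pvPairDC items ((lo + hi) / 2) hi init final
termination_by hi - lo
decreasing_by all_goals omega

def policy_all_alt (init : Int) (person : List Int) (final : Option Int) : Int :=
  match final with
  | none => pvChainDC (init :: person) 0 person.length
  | some f => pvPairDC person 0 person.length init f

-- ===== PRECONDITION & SPEC =====
def Spec_policy_all (init : Int) (person : List Int) (final : Option Int) (out : Int) : Prop := out = policy_all_alt init person final
instance (init : Int) (person : List Int) (final : Option Int) (out : Int) : Decidable (Spec_policy_all init person final out) := by unfold Spec_policy_all; infer_instance

-- ===== CLAIM (what is proved, stated in full; the proofs are below) =====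
def Claim_equal_policy_all : Prop := ∀ (init : Int) (person : List Int) (final : Option Int), Dom_policy_all init person final → Spec_policy_all init person final (policy_all init person final)

-- ===== LEMMAS AND PROOFS =====

-- Both DC functions compute the segment sum over [lo, hi).
theorem chainDC_eq (seq : List Int) (lo hi : Nat) :
    pvChainDC seq lo hi
      = ((List.range' lo (hi - lo)).map
          (fun i => PySem.Int.bxor (seq.getD i 0) (seq.getD (i + 1) 0))).sum := by
  fun_induction pvChainDC seq lo hi with
  | case1 lo hi h => simp [show hi - lo = 0 by omega]
  | case2 lo hi h h1 => simp [h1, List.getD_eq_getElem?_getD]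
  | case3 lo hi h h1 ih1 ih2 =>
      have hsplit : List.range' lo (hi - lo)
          = List.range' lo ((lo + hi) / 2 - lo) ++ List.range' ((lo + hi) / 2) (hi - (lo + hi) / 2) := by
        rw [show hi - lo = ((lo + hi) / 2 - lo) + (hi - (lo + hi) / 2) by omega,
          ← List.range'_append, show lo + 1 * ((lo + hi) / 2 - lo) = (lo + hi) / 2 by omega]
      rw [hsplit, List.map_append, List.sum_append, ih1, ih2]

theorem pairDC_eq (items : List Int) (lo hi : Nat) (init f : Int) :
    pvPairDC items lo hi init f
      = ((List.range' lo (hi - lo)).map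
          (fun i => PySem.Int.bxor init (items.getD i 0) + PySem.Int.bxor (items.getD i 0) f)).sum := by
  fun_induction pvPairDC items lo hi init f with
  | case1 lo hi h => simp [show hi - lo = 0 by omega]
  | case2 lo hi h h1 => simp [h1, List.getD_eq_getElem?_getD]; rfl
  | case3 lo hi h h1 ih1 ih2 =>
      have hsplit : List.range' lo (hi - lo)
          = List.range' lo ((lo + hi) / 2 - lo) ++ List.range' ((lo + hi) / 2) (hi - (lo + hi) / 2) := by
        rw [show hi - lo = ((lo + hi) / 2 - lo) + (hi - (lo + hi) / 2) by omega,
          ← List.range'_append, show lo + 1 * ((lo + hi) / 2 - lo) = (lo + hi) / 2 by omega]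
      rw [hsplit, List.map_append, List.sum_append, ih1, ih2]

-- A's loop in the final = none mode: accumulated count plus chained pairwise XOR.
theorem loop_none (person : List Int) (init c : Int) :
    (person.foldl (fun (s : Int × Int) item =>
        (s.1 + PySem.Int.bxor s.2 item, item)) (c, init)).1
      = c + ((List.range' 0 person.length).map
          (fun i => PySem.Int.bxor ((init :: person).getD i 0) ((init :: person).getD (i + 1) 0))).sum := by
  induction person generalizing init c with
  | nil => simp
  | cons x xs ih =>
      rw [List.foldl_cons, ih x (c + PySem.Int.bxor init x)]
      simp only [List.length_cons, List.range'_eq_map_range, List.map_map, List.range_succ_eq_map,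
        List.map_cons, List.sum_cons, Function.comp_def, Nat.zero_add,
        List.getD_cons_zero, List.getD_cons_succ, Nat.succ_eq_add_one]
      ring_nf

-- A's loop in the final = some f mode.
theorem loop_some (person : List Int) (f init c : Int) :
    (person.foldl (fun (s : Int × Int) item =>
        (s.1 + PySem.Int.bxor s.2 item + PySem.Int.bxor item f, s.2)) (c, init)).1
      = c + ((List.range' 0 person.length).map
          (fun i => PySem.Int.bxor init (person.getD i 0) + PySem.Int.bxor (person.getD i 0) f)).sum := by
  induction person generalizing c with
  | nil => simp
  | cons x xs ih =>
      rw [List.foldl_cons, ih]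
      simp only [List.length_cons, List.range'_eq_map_range, List.map_map, List.range_succ_eq_map,
        List.map_cons, List.sum_cons, Function.comp_def, Nat.zero_add,
        List.getD_cons_zero, List.getD_cons_succ, Nat.succ_eq_add_one]
      ring_nf

-- ===== VERDICT (by name: the statement is the Claim_ definition above) =====
theorem policy_all_spec : Claim_equal_policy_all := by
  intro init person final _
  unfold Spec_policy_all policy_all policy_all_alt
  cases final with
  | none =>
      dsimp only
      rw [chainDC_eq]
      simpa using loop_none person init 0
  | some f =>
      dsimp only
      rw [pairDC_eq]
      simpa using loop_some person f init 0
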